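-- pv_equiv track=rewrite | github.com/Seiyial/AdventOfCode2025 | day02/q2.py | repetitive
-- ===== SOURCE A (Python) =====
-- def repetitive(num: int):
-- 	s = str(num)
-- 	length = len(s)
--
-- 	for i in range(1, int(length / 2) + 1):
--
-- 		if length % i != 0:
-- 			continue
--
-- 		first = s[0:i]
-- 		ok = True
--
-- 		for j in range(1, int(length / i)):
-- 			cur = s[(j * i):((j + 1) * i)]
-- 			ok = cur == first
-- 			if not ok:
-- 				break
--
-- 		if ok:
-- 			return True
--
-- 	return False
-- ===== SOURCE B (Python) =====
-- def repetitive(num: int):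
-- 	s = str(num)
-- 	return s in (s + s)[1:-1]
-- ===== Notes on version B (the rewrite author's own statement) =====
-- stated objective: idiomatic
-- what changed: Replaces the divisor-enumerating double loop over chunk slices with the classic rotation trick: s is a repetition of a proper block iff s occurs in (s+s)[1:-1], a single substring test.
import Mathlib
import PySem

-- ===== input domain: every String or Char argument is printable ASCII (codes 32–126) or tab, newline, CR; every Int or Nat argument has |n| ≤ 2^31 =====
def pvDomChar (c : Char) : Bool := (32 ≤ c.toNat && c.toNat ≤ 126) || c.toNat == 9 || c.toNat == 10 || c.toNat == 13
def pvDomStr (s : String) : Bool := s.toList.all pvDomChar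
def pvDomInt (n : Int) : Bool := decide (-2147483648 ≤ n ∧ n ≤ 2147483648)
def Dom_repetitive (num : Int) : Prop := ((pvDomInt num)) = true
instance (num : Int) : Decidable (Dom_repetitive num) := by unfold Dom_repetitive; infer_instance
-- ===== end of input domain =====

-- B replaces A's divisor-enumerating double loop over chunk slices by the classic
-- rotation trick "s in (s+s)[1:-1]" — a single substring test (idiomatic, not claimed faster).


-- ===== PORT A =====
-- Python's int(length / 2) and int(length / i) are floor division here (length ≥ 0, i ≥ 1,
-- and the float quotient is exact for these magnitudes), ported as PySem.Int.floordiv.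
-- The inner ok/break loop computes the conjunction over its range (`all`); `return True`
-- inside the outer loop makes the outer loop the disjunction (`any`).
def repetitive (num : Int) : Bool :=
  let s : List Char := PySem.Int.toChars num
  let length : Int := PySem.Chars.len s
  (PySem.List.pyRange 1 (PySem.Int.floordiv length 2 + 1) 1).any (fun i =>
    if PySem.Int.mod length i ≠ 0 then false
    else
      let first := PySem.List.slice s (some 0) (some i)
      (PySem.List.pyRange 1 (PySem.Int.floordiv length i) 1).all (fun j =>
        PySem.List.slice s (some (j * i)) (some ((j + 1) * i)) == first))

-- ===== PORT B =====
def repetitive_alt (num : Int) : Bool :=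
  let s : List Char := PySem.Int.toChars num
  PySem.Chars.isIn s (PySem.List.slice (s ++ s) (some 1) (some (-1)))

-- ===== PRECONDITION & SPEC =====
def Spec_repetitive (num : Int) (out : Bool) : Prop := out = repetitive_alt num
instance (num : Int) (out : Bool) : Decidable (Spec_repetitive num out) := by unfold Spec_repetitive; infer_instance

-- ===== CLAIM (what is proved, stated in full; the proofs are below) =====
def Claim_equal_repetitive : Prop := ∀ (num : Int), Dom_repetitive num → Spec_repetitive num (repetitive num)

-- ===== LEMMAS AND PROOFS =====

-- l is i-periodic, mod form: every entry equals the entry at its index mod i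
def PerM (l : List Char) (i : ℕ) : Prop := ∀ j < l.length, l[j]? = l[j % i]?

-- l is invariant under the cyclic shift by q
def Cyc (l : List Char) (q : ℕ) : Prop := ∀ r < l.length, l[(q + r) % l.length]? = l[r]?

lemma toDigitsCore_eq_nil {b : ℕ} : ∀ (fuel n : ℕ) (ds : List Char),
    Nat.toDigitsCore b fuel n ds = [] → ds = []
  | 0, _, _, h => h
  | fuel+1, n, ds, h => by
      by_cases hnb : n / b = 0
      · simp [Nat.toDigitsCore, hnb] at h
      · have h' : Nat.toDigitsCore b fuel (n / b) ((n % b).digitChar :: ds) = [] := by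
          simpa [Nat.toDigitsCore, hnb] using h
        have := toDigitsCore_eq_nil fuel _ _ h'
        simp at this

lemma toDigitsCore_succ_ne_nil (b fuel n : ℕ) (ds : List Char) :
    Nat.toDigitsCore b (fuel+1) n ds ≠ [] := by
  by_cases hnb : n / b = 0
  · simp [Nat.toDigitsCore, hnb]
  · intro h
    have h' : Nat.toDigitsCore b fuel (n / b) ((n % b).digitChar :: ds) = [] := by
      simpa [Nat.toDigitsCore, hnb] using h
    have := toDigitsCore_eq_nil fuel _ _ h'
    simp at this

lemma toChars_ne_nil (num : Int) : PySem.Int.toChars num ≠ [] := by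
  unfold PySem.Int.toChars
  split
  · simp
  · exact toDigitsCore_succ_ne_nil 10 _ num.toNat []

lemma getElem?_double (l : List Char) (m : ℕ) (hm : m < 2 * l.length) :
    (l ++ l)[m]? = l[m % l.length]? := by
  by_cases h : m < l.length
  · rw [List.getElem?_append_left h, Nat.mod_eq_of_lt h]
  · have h1 : l.length ≤ m := le_of_not_gt h
    rw [List.getElem?_append_right h1]
    congr 1
    rw [Nat.mod_eq_sub_mod h1, Nat.mod_eq_of_lt (by omega)]

lemma chunk_iff (l : List Char) (i jn : ℕ) :
    ((l.drop (jn*i)).take i = l.take i) ↔ ∀ r < i, l[jn*i + r]? = l[r]? := by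
  constructor
  · intro h r hr
    have := congrArg (fun xs => xs[r]?) h
    simpa [List.getElem?_drop, hr] using this
  · intro h
    apply List.ext_getElem?
    intro r
    by_cases hr : r < i
    · simp [List.getElem?_drop, hr, h r hr]
    · simp [hr]

-- A's inner loop over all block positions is exactly the PerM predicate (for a divisor block size)
lemma chunks_iff_perM (l : List Char) (i : ℕ) (hi : 0 < i) (hd : i ∣ l.length) :
    (∀ jn : ℕ, 1 ≤ jn → jn < l.length / i → ∀ r < i, l[jn*i + r]? = l[r]?) ↔ PerM l i := by
  obtain ⟨c, hc⟩ := hd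
  constructor
  · intro H m hm
    have hr : m % i < i := Nat.mod_lt _ hi
    have hdm : i * (m / i) + m % i = m := Nat.div_add_mod m i
    by_cases hj : m / i = 0
    · have hmr : m = m % i := by rw [hj, Nat.mul_zero, Nat.zero_add] at hdm; exact hdm.symm
      rw [← hmr]
    · have hj1 : 1 ≤ m / i := Nat.one_le_iff_ne_zero.mpr hj
      have hj2 : m / i < l.length / i := by
        rw [hc, Nat.mul_div_cancel_left _ hi]
        exact Nat.div_lt_of_lt_mul (by rw [← hc]; exact hm)
      have := H (m / i) hj1 hj2 (m % i) hr
      rw [show m / i * i + m % i = m by rw [Nat.mul_comm]; exact hdm] at this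
      exact this
  · intro H jn _ hjn r hr
    have hle : (jn + 1) * i ≤ l.length := by
      calc (jn + 1) * i ≤ l.length / i * i := Nat.mul_le_mul_right _ hjn
      _ ≤ l.length := Nat.div_mul_le_self _ _
    have hlt : jn * i + r < l.length := by
      have : jn * i + r < (jn + 1) * i := by rw [Nat.add_mul, Nat.one_mul]; omega
      omega
    have h1 := H (jn * i + r) hlt
    have h2 : (jn * i + r) % i = r % i := by
      rw [Nat.add_comm, Nat.add_mul_mod_self_right]
    rw [h1, h2, Nat.mod_eq_of_lt hr]

lemma slice_chunk (l : List Char) (jn i0 : ℕ) :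
    PySem.List.slice l (some ((jn : ℤ) * (i0 : ℤ))) (some (((jn : ℤ) + 1) * (i0 : ℤ)))
      = (l.drop (jn * i0)).take i0 := by
  have h1 : ((jn:ℤ) * (i0:ℤ)) = ((jn * i0 : ℕ) : ℤ) := by push_cast; ring
  have h2 : (((jn:ℤ) + 1) * (i0:ℤ)) = ((jn * i0 + i0 : ℕ) : ℤ) := by push_cast; ring
  rw [h1, h2, PySem.List.slice_natCast]
  congr 1
  omega

-- A's inner `all` loop is exactly PerM (for a divisor block size)
lemma inner_iff (l : List Char) (i0 : ℕ) (hi : 1 ≤ i0) (hd : i0 ∣ l.length) :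
    ((PySem.List.pyRange 1 (PySem.Int.floordiv ((l.length : ℕ) : ℤ) ((i0 : ℕ) : ℤ)) 1).all (fun j =>
        PySem.List.slice l (some (j * (i0:ℤ))) (some ((j + 1) * (i0:ℤ))) == PySem.List.slice l (some 0) (some (i0:ℤ))) = true)
    ↔ PerM l i0 := by
  have hfd : PySem.Int.floordiv ((l.length:ℕ):ℤ) ((i0:ℕ):ℤ) = ((l.length / i0 : ℕ):ℤ) :=
    PySem.Int.floordiv_natCast l.length i0
  have hfirst : PySem.List.slice l (some (0:ℤ)) (some (i0:ℤ)) = l.take i0 := by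
    rw [PySem.List.slice_zero_start, PySem.List.slice_to_natCast]
  rw [hfd, List.all_eq_true, ← chunks_iff_perM l i0 (by omega) hd]
  constructor
  · intro H jn h1 h2
    have hj := H (jn:ℤ) (by
      rw [PySem.List.mem_pyRange_one]
      exact ⟨by exact_mod_cast h1, by exact_mod_cast h2⟩)
    rw [beq_iff_eq, slice_chunk, hfirst] at hj
    exact (chunk_iff l i0 jn).mp hj
  · intro H j hj
    rw [PySem.List.mem_pyRange_one] at hj
    lift j to ℕ using (by omega) with jn
    have h1 : 1 ≤ jn := by exact_mod_cast hj.1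
    have h2 : jn < l.length / i0 := by exact_mod_cast hj.2
    rw [beq_iff_eq, slice_chunk, hfirst]
    exact (chunk_iff l i0 jn).mpr (H jn h1 h2)

-- characterization of port A's loop
lemma A_iff (l : List Char) :
    ((PySem.List.pyRange 1 (PySem.Int.floordiv (PySem.Chars.len l) 2 + 1) 1).any (fun i =>
      if PySem.Int.mod (PySem.Chars.len l) i ≠ 0 then false
      else (PySem.List.pyRange 1 (PySem.Int.floordiv (PySem.Chars.len l) i) 1).all (fun j =>
        PySem.List.slice l (some (j * i)) (some ((j + 1) * i)) == PySem.List.slice l (some 0) (some i))) = true)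
    ↔ ∃ i : ℕ, 1 ≤ i ∧ i ≤ l.length / 2 ∧ i ∣ l.length ∧ PerM l i := by
  have hlen : PySem.Chars.len l = ((l.length : ℕ) : ℤ) := PySem.Chars.len_eq l
  have hfd2 : PySem.Int.floordiv ((l.length : ℕ) : ℤ) 2 = ((l.length / 2 : ℕ) : ℤ) := by
    exact_mod_cast PySem.Int.floordiv_natCast l.length 2
  rw [hlen, hfd2, List.any_eq_true]
  constructor
  · rintro ⟨x, hx, hpx⟩
    rw [PySem.List.mem_pyRange_one] at hx
    obtain ⟨hx1, hx2⟩ := hx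
    lift x to ℕ using (by omega) with i0
    have hi1 : 1 ≤ i0 := by exact_mod_cast hx1
    have hx2' : (i0:ℤ) ≤ ((l.length / 2 : ℕ) : ℤ) := Int.lt_add_one_iff.mp hx2
    have hi2 : i0 ≤ l.length / 2 := by exact_mod_cast hx2'
    by_cases hmod : PySem.Int.mod ((l.length : ℕ) : ℤ) ((i0 : ℕ) : ℤ) = 0
    · have hdvd : i0 ∣ l.length := by
        have := (PySem.Int.mod_eq_zero_iff_dvd _ _).mp hmod
        exact_mod_cast this
      rw [if_neg (by simp [hmod])] at hpx
      exact ⟨i0, hi1, hi2, hdvd, (inner_iff l i0 hi1 hdvd).mp hpx⟩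
    · rw [if_pos hmod] at hpx
      exact absurd hpx (by simp)
  · rintro ⟨i0, hi1, hi2, hdvd, hp⟩
    refine ⟨(i0:ℤ), ?_, ?_⟩
    · rw [PySem.List.mem_pyRange_one]
      have hi2' : (i0:ℤ) ≤ ((l.length / 2 : ℕ) : ℤ) := by exact_mod_cast hi2
      exact ⟨by exact_mod_cast hi1, Int.lt_add_one_iff.mpr hi2'⟩
    · have hmod : PySem.Int.mod ((l.length : ℕ) : ℤ) ((i0 : ℕ) : ℤ) = 0 :=
        (PySem.Int.mod_eq_zero_iff_dvd _ _).mpr (by exact_mod_cast hdvd)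
      rw [if_neg (by simp [hmod])]
      exact (inner_iff l i0 hi1 hdvd).mpr hp

-- characterization of port B's substring test
lemma B_iff (l : List Char) (hl : l ≠ []) :
    (PySem.Chars.isIn l (PySem.List.slice (l ++ l) (some 1) (some (-1))) = true)
    ↔ ∃ q : ℕ, 1 ≤ q ∧ q ≤ l.length - 1 ∧ Cyc l q := by
  have hn : 0 < l.length := List.length_pos_of_ne_nil hl
  have hmid : PySem.List.slice (l ++ l) (some 1) (some (-1))
      = ((l ++ l).drop 1).take (l.length + l.length - 2) := by
    have h1 : PySem.List.clampIdx (l ++ l).length 1 = 1 := by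
      simp [PySem.List.clampIdx]; omega
    show List.take _ (List.drop _ _) = _
    dsimp only
    rw [PySem.List.clampIdx_neg_one, h1]
    congr 1
    · simp; omega
  rw [PySem.Chars.isIn_iff_infix, hmid]
  constructor
  · rintro ⟨s, t, hst⟩
    have hlen : s.length + l.length + t.length = l.length + l.length - 2 := by
      have := congrArg List.length hst
      simp at this
      omega
    set p := s.length with hp
    have hn2 : 2 ≤ l.length := by omega
    refine ⟨p + 1, by omega, by omega, ?_⟩
    intro r hr
    have e1 : (s ++ l ++ t)[p + r]? = l[r]? := by
      rw [List.append_assoc, List.getElem?_append_right (by omega)]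
      rw [show p + r - s.length = r by omega, List.getElem?_append_left hr]
    have e2 : (((l ++ l).drop 1).take (l.length + l.length - 2))[p + r]? = (l ++ l)[1 + (p + r)]? := by
      rw [List.getElem?_take_of_lt (by omega), List.getElem?_drop]
    have e3 : (l ++ l)[1 + (p + r)]? = l[((p + 1) + r) % l.length]? := by
      rw [show 1 + (p + r) = (p + 1) + r from by omega, getElem?_double l _ (by omega)]
    rw [← e1, hst, e2, e3]
  · rintro ⟨q, hq1, hq2, hc⟩
    have hn2 : 2 ≤ l.length := by omega
    have hsub : (((((l ++ l).drop 1).take (l.length + l.length - 2)).drop (q - 1)).take l.length) = l := by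
      apply List.ext_getElem?
      intro r
      by_cases hr : r < l.length
      · rw [List.getElem?_take_of_lt hr, List.getElem?_drop,
            List.getElem?_take_of_lt (by omega), List.getElem?_drop]
        rw [show 1 + (q - 1 + r) = q + r by omega, getElem?_double l _ (by omega)]
        exact hc r hr
      · have hr' : l.length ≤ r := le_of_not_gt hr
        rw [List.getElem?_eq_none hr']
        exact List.getElem?_eq_none (le_trans (List.length_take_le _ _) hr')
    calc l = _ := hsub.symm
    _ <:+: (((l ++ l).drop 1).take (l.length + l.length - 2)).drop (q - 1) := (List.take_prefix _ _).isInfix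
    _ <:+: ((l ++ l).drop 1).take (l.length + l.length - 2) := (List.drop_suffix _ _).isInfix

-- a divisor period yields cyclic-shift invariance by that period
lemma cyc_of_perM (l : List Char) (i : ℕ) (hd : i ∣ l.length) (hn : 0 < l.length)
    (hp : PerM l i) : Cyc l i := by
  intro r hr
  have h1 : (i + r) % l.length < l.length := Nat.mod_lt _ hn
  rw [hp _ h1, hp r hr, Nat.mod_mod_of_dvd _ hd, Nat.add_mod_left]

lemma exists_mul_mod_eq_gcd (q n : ℕ) (hq : 0 < q) (hqn : q < n) :
    ∃ k : ℕ, (k * q) % n = Nat.gcd q n := by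
  have hn : 0 < n := lt_trans hq hqn
  have hg : (Nat.gcd q n : ℤ) = q * Nat.gcdA q n + n * Nat.gcdB q n := Nat.gcd_eq_gcd_ab q n
  have hn' : (n : ℤ) ≠ 0 := by exact_mod_cast hn.ne'
  have h0 : (0:ℤ) ≤ Nat.gcdA q n % n := Int.emod_nonneg _ hn'
  refine ⟨(Nat.gcdA q n % n).toNat, ?_⟩
  have hgle : Nat.gcd q n ≤ q := Nat.le_of_dvd hq (Nat.gcd_dvd_left q n)
  have key : (((Nat.gcdA q n % n).toNat * q : ℕ) : ℤ) % n = ((Nat.gcd q n : ℕ) : ℤ) := by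
    push_cast [Int.toNat_of_nonneg h0]
    rw [Int.mul_emod, Int.emod_emod_of_dvd _ dvd_rfl, ← Int.mul_emod]
    have hqa : (Nat.gcdA q n) * (q:ℤ) = ((Nat.gcd q n : ℕ) : ℤ) - n * Nat.gcdB q n := by
      linarith [hg]
    rw [hqa, Int.sub_emod, Int.mul_emod_right, sub_zero, Int.emod_emod_of_dvd _ dvd_rfl]
    exact Int.emod_eq_of_lt (by positivity) (by exact_mod_cast lt_of_le_of_lt hgle hqn)
  exact_mod_cast key

-- shift invariance to mod form
lemma perM_of_shift (l : List Char) (g : ℕ) (hg : 0 < g)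
    (h : ∀ j, j + g < l.length → l[j + g]? = l[j]?) : PerM l g := by
  intro j
  induction j using Nat.strong_induction_on with
  | _ j ih =>
    intro hj
    by_cases hjg : j < g
    · rw [Nat.mod_eq_of_lt hjg]
    · have hge : g ≤ j := le_of_not_gt hjg
      have h1 : (j - g) + g = j := by omega
      have h2 : l[j]? = l[j - g]? := by
        have h2' := h (j - g) (by omega)
        rwa [h1] at h2'
      have h3 : j % g = (j - g) % g := by
        conv_lhs => rw [← h1]
        rw [Nat.add_mod_right]
      rw [h2, h3]
      exact ih (j - g) (show j - g < j by omega) (show j - g < l.length by omega)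

-- cyclic-shift invariance by q yields the gcd(q, n) period
lemma cyc_gcd (l : List Char) (q : ℕ) (hq1 : 1 ≤ q) (hq2 : q ≤ l.length - 1)
    (hl : l ≠ []) (hc : Cyc l q) :
    1 ≤ Nat.gcd q l.length ∧ Nat.gcd q l.length ≤ l.length / 2 ∧
      Nat.gcd q l.length ∣ l.length ∧ PerM l (Nat.gcd q l.length) := by
  have hn : 0 < l.length := List.length_pos_of_ne_nil hl
  have hn2 : 2 ≤ l.length := by omega
  have hqn : q < l.length := by omega
  set g := Nat.gcd q l.length with hgdef
  have hg1 : 1 ≤ g := Nat.gcd_pos_of_pos_left _ (by omega)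
  have hgd : g ∣ l.length := Nat.gcd_dvd_right q l.length
  have hgq : g ≤ q := Nat.le_of_dvd (by omega) (Nat.gcd_dvd_left _ _)
  have hglt : g < l.length := by omega
  have hghalf : g ≤ l.length / 2 := by
    obtain ⟨c, hc'⟩ := hgd
    have hc2 : 2 ≤ c := by
      by_contra hlt
      push Not at hlt
      have : l.length ≤ g := by
        rw [hc']
        calc g * c ≤ g * 1 := Nat.mul_le_mul_left _ (by omega)
        _ = g := Nat.mul_one g
      omega
    rw [Nat.le_div_iff_mul_le (by omega)]
    calc g * 2 ≤ g * c := Nat.mul_le_mul_left _ hc2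
    _ = l.length := hc'.symm
  have hcm : ∀ m, l[(q + m) % l.length]? = l[m % l.length]? := by
    intro m
    have h1 : m % l.length < l.length := Nat.mod_lt _ hn
    have h2 := hc (m % l.length) h1
    have h3 : (q + m) % l.length = (q + m % l.length) % l.length := by
      conv_lhs => rw [Nat.add_mod]
      conv_rhs => rw [Nat.add_mod, Nat.mod_mod_of_dvd _ (dvd_refl _)]
    rw [h3]
    exact h2
  have hk : ∀ (k m : ℕ), l[(k * q + m) % l.length]? = l[m % l.length]? := by
    intro k
    induction k with
    | zero => intro m; simp
    | succ k ih =>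
      intro m
      have e : (k + 1) * q + m = q + (k * q + m) := by ring
      rw [e, hcm (k * q + m), ih m]
  obtain ⟨k, hkg⟩ := exists_mul_mod_eq_gcd q l.length (by omega) hqn
  have hshift : ∀ j, j + g < l.length → l[j + g]? = l[j]? := by
    intro j hj
    have e2 : (k * q + j) % l.length = (g + j) % l.length := by
      calc (k * q + j) % l.length = ((k * q) % l.length + j % l.length) % l.length :=
            Nat.add_mod _ _ _
      _ = (g % l.length + j % l.length) % l.length := by rw [hkg, Nat.mod_eq_of_lt hglt]
      _ = (g + j) % l.length := (Nat.add_mod _ _ _).symm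
    have e3 : l[j + g]? = l[(g + j) % l.length]? := by
      rw [Nat.mod_eq_of_lt (by omega), Nat.add_comm]
    rw [e3, ← e2, hk k j, Nat.mod_eq_of_lt (by omega)]
  exact ⟨hg1, hghalf, hgd, perM_of_shift l g (by omega) hshift⟩

lemma main_eq (l : List Char) (hl : l ≠ []) :
    ((PySem.List.pyRange 1 (PySem.Int.floordiv (PySem.Chars.len l) 2 + 1) 1).any (fun i =>
      if PySem.Int.mod (PySem.Chars.len l) i ≠ 0 then false
      else (PySem.List.pyRange 1 (PySem.Int.floordiv (PySem.Chars.len l) i) 1).all (fun j =>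
        PySem.List.slice l (some (j * i)) (some ((j + 1) * i)) == PySem.List.slice l (some 0) (some i))))
    = PySem.Chars.isIn l (PySem.List.slice (l ++ l) (some 1) (some (-1))) := by
  rw [Bool.eq_iff_iff, A_iff l, B_iff l hl]
  constructor
  · rintro ⟨i, hi1, hi2, hid, hp⟩
    have hn2 : 2 ≤ l.length := by
      have := (Nat.le_div_iff_mul_le (by omega)).mp hi2
      omega
    exact ⟨i, hi1, by omega, cyc_of_perM l i hid (by omega) hp⟩
  · rintro ⟨q, hq1, hq2, hc⟩
    obtain ⟨h1, h2, h3, h4⟩ := cyc_gcd l q hq1 hq2 hl hc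
    exact ⟨Nat.gcd q l.length, h1, h2, h3, h4⟩

-- ===== VERDICT (by name: the statement is the Claim_ definition above) =====
theorem repetitive_spec : Claim_equal_repetitive := by
  intro num _
  unfold Spec_repetitive
  simp only [repetitive, repetitive_alt]
  exact main_eq (PySem.Int.toChars num) (toChars_ne_nil num)
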